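-- pv_equiv track=rewrite | github.com/fpddmw/skills | moderator-observer-listener-orchestrator/scripts/moderator_router.py | _collect_primary_status
-- ===== SOURCE A (Python) =====
-- from typing import Any
--
-- def normalize_space(value: Any) -> str:
--     return " ".join(str(value or "").split())
--
-- def _collect_primary_status(records: list[dict[str, Any]], fallback: str) -> str:
--     for record in records:
--         if record.get("id") == fallback and normalize_space(record.get("status_line")):
--             return normalize_space(record.get("status_line"))
--     for record in reversed(records):
--         line = normalize_space(record.get("status_line"))
--         if line:
--             return line
--     return ""
-- ===== SOURCE B (Python) =====
-- from typing import Any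
--
-- def normalize_space(value: Any) -> str:
--     return " ".join(str(value or "").split())
--
-- def _collect_primary_status(records: list[dict[str, Any]], fallback: str) -> str:
--     first_match = None
--     last_nonempty = ""
--     for record in records:
--         line = normalize_space(record.get("status_line"))
--         if line:
--             last_nonempty = line
--             if first_match is None and record.get("id") == fallback:
--                 first_match = line
--     return first_match if first_match is not None else last_nonempty
-- ===== Notes on version B (the rewrite author's own statement) =====
-- stated objective: alternative
-- what changed: Replaces A's two sequential scans (forward early-return search for the fallback match, then a reversed scan for the last non-empty line) with one forward pass that maintains first_match and last_nonempty accumulators and decides after the loop.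
import Mathlib
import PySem

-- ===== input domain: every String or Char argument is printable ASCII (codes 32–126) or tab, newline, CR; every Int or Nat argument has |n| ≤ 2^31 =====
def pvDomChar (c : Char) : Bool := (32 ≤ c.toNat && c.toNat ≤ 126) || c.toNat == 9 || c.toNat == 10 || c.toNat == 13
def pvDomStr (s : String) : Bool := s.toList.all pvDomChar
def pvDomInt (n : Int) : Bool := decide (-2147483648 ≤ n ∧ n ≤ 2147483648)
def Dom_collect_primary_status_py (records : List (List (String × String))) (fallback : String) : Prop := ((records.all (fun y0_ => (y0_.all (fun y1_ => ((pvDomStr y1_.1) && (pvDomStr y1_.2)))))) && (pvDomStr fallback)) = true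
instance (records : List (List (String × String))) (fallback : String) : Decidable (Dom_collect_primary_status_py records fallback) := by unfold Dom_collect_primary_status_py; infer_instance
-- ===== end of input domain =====

-- B replaces A's two sequential scans (forward early-return, then reversed scan) by one
-- forward pass maintaining first_match / last_nonempty accumulators (objective: alternative).

-- ===== PORT A =====
-- dict.get (association list, first match)
def pv_get : List (String × String) → String → Option String
  | [], _ => none
  | (k, v) :: rest, key => if k = key then some v else pv_get rest key

-- normalize_space(value): " ".join(str(value or "").split())
def pv_norm (v : Option String) : String :=
  PySem.Str.join " " (PySem.Str.split₀ (v.getD ""))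

-- first loop of A: early return on matching id with non-empty normalized line
def pvA_first (fallback : String) : List (List (String × String)) → Option String
  | [] => none
  | r :: rs =>
    if pv_get r "id" = some fallback ∧ pv_norm (pv_get r "status_line") ≠ "" then
      some (pv_norm (pv_get r "status_line"))
    else pvA_first fallback rs

-- second loop of A: applied to records.reverse (for record in reversed(records))
def pvA_last : List (List (String × String)) → Option String
  | [] => none
  | r :: rs =>
    let line := pv_norm (pv_get r "status_line")
    if line ≠ "" then some line else pvA_last rs

def collect_primary_status_py (records : List (List (String × String))) (fallback : String) : String :=
  match pvA_first fallback records with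
  | some s => s
  | none =>
    match pvA_last records.reverse with
    | some s => s
    | none => ""

-- ===== PORT B =====
-- one step of B's loop on the state (first_match, last_nonempty)
def pvB_step (fallback : String) (st : Option String × String) (r : List (String × String)) :
    Option String × String :=
  let line := pv_norm (pv_get r "status_line")
  if line ≠ "" then
    (if st.1 = none ∧ pv_get r "id" = some fallback then some line else st.1, line)
  else st

def collect_primary_status_py_alt (records : List (List (String × String))) (fallback : String) : String :=
  let st := records.foldl (pvB_step fallback) (none, "")
  match st.1 with
  | some s => s
  | none => st.2

-- ===== PRECONDITION & SPEC =====
def Spec_collect_primary_status_py (records : List (List (String × String))) (fallback : String) (out : String) : Prop := out = collect_primary_status_py_alt records fallback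
instance (records : List (List (String × String))) (fallback : String) (out : String) : Decidable (Spec_collect_primary_status_py records fallback out) := by unfold Spec_collect_primary_status_py; infer_instance

-- ===== CLAIM (what is proved, stated in full; the proofs are below) =====
def Claim_equal_collect_primary_status_py : Prop := ∀ (records : List (List (String × String))) (fallback : String), Dom_collect_primary_status_py records fallback → Spec_collect_primary_status_py records fallback (collect_primary_status_py records fallback)

-- ===== LEMMAS AND PROOFS =====

-- A's reversed scan splits over append: first non-empty line, left part first
theorem pvA_last_append (l1 l2 : List (List (String × String))) :
    pvA_last (l1 ++ l2) = ((pvA_last l1).map some).getD (pvA_last l2) := by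
  induction l1 with
  | nil => simp [pvA_last]
  | cons r rs ih =>
    simp only [List.cons_append, pvA_last, ih]
    split <;> simp

-- B's foldl state characterized by A's two scans
theorem pvB_foldl (fallback : String) (xs : List (List (String × String)))
    (fm : Option String) (ln : String) :
    xs.foldl (pvB_step fallback) (fm, ln) =
      (((fm.map some).getD (pvA_first fallback xs)),
       ((pvA_last xs.reverse).getD ln)) := by
  induction xs generalizing fm ln with
  | nil => cases fm <;> simp [pvA_first, pvA_last]
  | cons r rs ih =>
    simp only [List.foldl_cons, List.reverse_cons, pvA_last_append, pvA_first]
    rw [pvB_step]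
    by_cases hline : pv_norm (pv_get r "status_line") ≠ ""
    · rw [if_pos (by simpa using hline)]
      by_cases hid : pv_get r "id" = some fallback
      · cases fm with
        | none => simp [ih, hid, pvA_last, hline]
        | some v => simp [ih, hid, pvA_last, hline]
      · cases fm with
        | none => simp [ih, hid, hline, pvA_last]
        | some v => simp [ih, hid, hline, pvA_last]
    · rw [not_not] at hline
      have hcond : ¬ (pv_get r "id" = some fallback ∧ pv_norm (pv_get r "status_line") ≠ "") := by
        simp [hline]
      simp only [hline, ne_eq, not_true_eq_false, if_false, ih]
      cases pvA_last rs.reverse <;> simp [pvA_last, hline]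

-- ===== VERDICT (by name: the statement is the Claim_ definition above) =====
theorem collect_primary_status_py_spec : Claim_equal_collect_primary_status_py := by
  intro records fallback _
  unfold Spec_collect_primary_status_py collect_primary_status_py collect_primary_status_py_alt
  rw [pvB_foldl]
  cases h : pvA_first fallback records with
  | some s => simp
  | none =>
    cases h2 : pvA_last records.reverse with
    | some s => simp
    | none => simp
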